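-- pv_equiv track=rewrite | github.com/p1x31/ctci-python | edx/cf/886/e.py | find_w
-- ===== SOURCE A (Python) =====
-- def calculate_area(painting_sizes, w):
--     total_area = 0
--     for size in painting_sizes:
--         total_area += (size + 2 * w) ** 2 - size ** 2
--     return total_area
--
-- def find_w(painting_sizes, c):
--     # Set the left and right bounds for the binary search
--     left = 0
--     right = 10**9
--
--     # Perform binary search until the left and right bounds overlap
--     while left < right:
--         # Calculate the midpoint of the current left and right bounds
--         mid = (left + right) // 2
--
--         # Calculate the area using the given painting sizes and the current midpoint
--         area = calculate_area(painting_sizes, mid)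
--
--         # Check if the calculated area is equal to the target area
--         if area == c:
--             # If the area is equal to the target area, return the current midpoint decreased by 1
--             # If the current midpoint is already 1, return 1
--             return mid - 1 if mid - 1 >= 1 else mid
--         elif area < c:
--             # If the calculated area is less than the target area, adjust the left bound to be the current midpoint + 1
--             left = mid + 1
--         else:
--             # If the calculated area is greater than the target area, adjust the right bound to be the current midpoint
--             right = mid
--
--     # If the left and right bounds overlap, return the current left bound decreased by 1
--     # If the current left bound is already 1, return 1
--     return left - 1 if left - 1 >= 1 else left
-- ===== SOURCE B (Python) =====
-- def find_w(painting_sizes, c):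
--     # Hoist the list out of the search: the added border area is the closed form
--     # sum((s+2w)^2 - s^2) = 4*w*(n*w + S), so each probe is O(1) instead of O(n).
--     n = len(painting_sizes)
--     s = sum(painting_sizes)
--
--     def clamp(w):
--         return w - 1 if w - 1 >= 1 else w
--
--     def search(left, right):
--         if left >= right:
--             return clamp(left)
--         mid = (left + right) // 2
--         area = 4 * mid * (n * mid + s)
--         if area == c:
--             return clamp(mid)
--         if area < c:
--             return search(mid + 1, right)
--         return search(left, mid)
--
--     return search(0, 10**9)
-- ===== Notes on version B (the rewrite author's own statement) =====
-- stated objective: faster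
-- what changed: B precomputes n=len and S=sum once and evaluates each probe's border area by the closed form 4*w*(n*w+S), eliminating A's O(n) calculate_area scan inside every binary-search iteration, and expresses the search as a recursive helper.
import Mathlib
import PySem

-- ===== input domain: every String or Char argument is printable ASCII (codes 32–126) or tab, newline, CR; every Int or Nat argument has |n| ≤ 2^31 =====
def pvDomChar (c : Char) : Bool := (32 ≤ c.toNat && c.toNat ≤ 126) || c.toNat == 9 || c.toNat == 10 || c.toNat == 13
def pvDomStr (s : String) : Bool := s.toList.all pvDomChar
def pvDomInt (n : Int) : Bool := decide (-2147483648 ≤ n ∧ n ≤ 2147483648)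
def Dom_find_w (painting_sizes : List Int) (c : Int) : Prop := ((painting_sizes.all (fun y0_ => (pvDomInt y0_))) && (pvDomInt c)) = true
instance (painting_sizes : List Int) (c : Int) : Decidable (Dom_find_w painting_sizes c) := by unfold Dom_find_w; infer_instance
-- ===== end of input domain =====

-- B hoists len/sum out of the binary search and computes each probe area by the closed form
-- 4*w*(n*w+S), removing A's per-iteration O(n) scan; proved to return A's exact value on all inputs.


-- ===== PORT A =====
def calculate_area (painting_sizes : List Int) (w : Int) : Int :=
  painting_sizes.foldl (fun total size => total + ((size + 2 * w) ^ 2 - size ^ 2)) 0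

-- the while-loop; the Nat argument is FUEL, a pure termination guard: the interval halves each
-- step, so 64 ≥ log2(10^9)+1 iterations always suffice for the fixed call range [0, 10^9)
def find_w_loop (painting_sizes : List Int) (c : Int) : Nat → Int → Int → Int
  | 0, left, _right => if left - 1 ≥ 1 then left - 1 else left
  | fuel + 1, left, right =>
    if left < right then
      let mid := PySem.Int.floordiv (left + right) 2
      let area := calculate_area painting_sizes mid
      if area = c then (if mid - 1 ≥ 1 then mid - 1 else mid)
      else if area < c then find_w_loop painting_sizes c fuel (mid + 1) right
      else find_w_loop painting_sizes c fuel left mid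
    else (if left - 1 ≥ 1 then left - 1 else left)

def find_w (painting_sizes : List Int) (c : Int) : Int :=
  find_w_loop painting_sizes c 64 0 1000000000

-- ===== PORT B =====
def fw_clamp (w : Int) : Int := if w - 1 ≥ 1 then w - 1 else w

-- recursive binary search on the closed-form area; same fuel guard as the A-side loop
def fw_search (n s c : Int) : Nat → Int → Int → Int
  | 0, left, _right => fw_clamp left
  | fuel + 1, left, right =>
    if left ≥ right then fw_clamp left
    else
      let mid := PySem.Int.floordiv (left + right) 2
      let area := 4 * mid * (n * mid + s)
      if area = c then fw_clamp mid
      else if area < c then fw_search n s c fuel (mid + 1) right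
      else fw_search n s c fuel left mid

def find_w_alt (painting_sizes : List Int) (c : Int) : Int :=
  fw_search painting_sizes.length painting_sizes.sum c 64 0 1000000000

-- ===== PRECONDITION & SPEC =====
def Spec_find_w (painting_sizes : List Int) (c : Int) (out : Int) : Prop := out = find_w_alt painting_sizes c
instance (painting_sizes : List Int) (c : Int) (out : Int) : Decidable (Spec_find_w painting_sizes c out) := by unfold Spec_find_w; infer_instance

-- ===== CLAIM (what is proved, stated in full; the proofs are below) =====
def Claim_equal_find_w : Prop := ∀ (painting_sizes : List Int) (c : Int), Dom_find_w painting_sizes c → Spec_find_w painting_sizes c (find_w painting_sizes c)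

-- ===== LEMMAS AND PROOFS =====

-- the closed form of A's per-probe scan: sum((s+2w)^2 - s^2) = 4*w*(n*w + S)
lemma calculate_area_closed (painting_sizes : List Int) (w : Int) :
    calculate_area painting_sizes w =
      4 * w * ((painting_sizes.length : Int) * w + painting_sizes.sum) := by
  suffices h : ∀ (a : Int),
      painting_sizes.foldl (fun total size => total + ((size + 2 * w) ^ 2 - size ^ 2)) a =
        a + 4 * w * ((painting_sizes.length : Int) * w + painting_sizes.sum) by
    simpa [calculate_area] using h 0
  induction painting_sizes with
  | nil => intro a; simp
  | cons x xs ih =>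
      intro a
      simp only [List.foldl_cons, List.length_cons, List.sum_cons, ih]
      push_cast
      ring

lemma loop_eq_search (painting_sizes : List Int) (c : Int) :
    ∀ (fuel : Nat) (left right : Int),
      find_w_loop painting_sizes c fuel left right =
        fw_search painting_sizes.length painting_sizes.sum c fuel left right := by
  intro fuel
  induction fuel with
  | zero => intro l r; rfl
  | succ fuel ih =>
      intro l r
      rw [find_w_loop, fw_search]
      by_cases hlr : l < r
      · rw [if_pos hlr, if_neg (show ¬ l ≥ r from by omega)]
        simp only [calculate_area_closed]
        split_ifs <;> first | exact ih _ _ | (unfold fw_clamp; split_ifs; omega)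
      · rw [if_neg hlr, if_pos (show l ≥ r from by omega)]
        unfold fw_clamp
        rfl

-- ===== VERDICT (by name: the statement is the Claim_ definition above) =====
theorem find_w_spec : Claim_equal_find_w := by
  intro painting_sizes c _
  unfold Spec_find_w find_w find_w_alt
  exact loop_eq_search painting_sizes c 64 0 1000000000
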